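-- pv_equiv track=rewrite | github.com/mederti/mederti | backend/scrapers/tga_recalls_scraper.py | _map_reason
-- ===== SOURCE A (Python) =====
-- def _map_reason(raw: str) -> str:
--     if not raw:
--         return "other"
--     lower = raw.lower()
--     if any(w in lower for w in ["contamination", "contaminated", "impurity", "impurities"]):
--         return "contamination"
--     if any(w in lower for w in ["label", "labelling", "mislabel", "packaging text"]):
--         return "mislabelling"
--     if any(w in lower for w in ["potency", "subpotent", "dissolution", "strength", "assay"]):
--         return "subpotency"
--     if any(w in lower for w in ["packaging", "container", "seal", "closure", "leak"]):
--         return "packaging"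
--     if any(w in lower for w in ["sterile", "sterility", "non-sterile"]):
--         return "sterility"
--     if any(w in lower for w in ["foreign", "particulate", "particles", "matter"]):
--         return "foreign_matter"
--     return "other"
-- ===== SOURCE B (Python) =====
-- CATEGORIES = ["contamination", "mislabelling", "subpotency", "packaging", "sterility", "foreign_matter"]
--
-- KEYWORDS = [
--     ("contamination", 0), ("contaminated", 0), ("impurity", 0), ("impurities", 0),
--     ("label", 1), ("labelling", 1), ("mislabel", 1), ("packaging text", 1),
--     ("potency", 2), ("subpotent", 2), ("dissolution", 2), ("strength", 2), ("assay", 2),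
--     ("packaging", 3), ("container", 3), ("seal", 3), ("closure", 3), ("leak", 3),
--     ("sterile", 4), ("sterility", 4), ("non-sterile", 4),
--     ("foreign", 5), ("particulate", 5), ("particles", 5), ("matter", 5),
-- ]
--
-- def _map_reason(raw: str) -> str:
--     # Single left-to-right scan over the text: at every position try each keyword
--     # as a prefix and keep the minimum priority seen; map it to a category at the end.
--     if not raw:
--         return "other"
--     lower = raw.lower()
--     best = None
--     for i in range(len(lower)):
--         for word, pri in KEYWORDS:
--             if lower.startswith(word, i) and (best is None or pri < best):
--                 best = pri
--     return "other" if best is None else CATEGORIES[best]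
-- ===== Notes on version B (the rewrite author's own statement) =====
-- stated objective: alternative
-- what changed: Instead of six sequential any-substring-search branches, B makes one position-by-position scan of the lowered text, matching every keyword as a prefix at each position and keeping the minimum priority, which is mapped to its category at the end.
import Mathlib
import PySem

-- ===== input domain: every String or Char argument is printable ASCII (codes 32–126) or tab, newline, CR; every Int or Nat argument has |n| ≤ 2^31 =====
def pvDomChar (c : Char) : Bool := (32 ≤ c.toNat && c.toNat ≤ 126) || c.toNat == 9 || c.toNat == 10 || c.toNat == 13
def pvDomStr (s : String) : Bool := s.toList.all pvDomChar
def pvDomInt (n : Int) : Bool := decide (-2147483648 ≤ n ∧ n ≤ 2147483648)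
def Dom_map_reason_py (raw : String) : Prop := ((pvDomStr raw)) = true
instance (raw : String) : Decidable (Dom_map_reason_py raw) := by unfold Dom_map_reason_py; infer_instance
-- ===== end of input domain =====

-- B replaces six sequential any-substring branches by one position-by-position scan keeping the minimum keyword priority (alternative algorithm; same behaviour, same cost).


-- ===== PORT A =====
def map_reason_py (raw : String) : String :=
  if raw = "" then "other"
  else
    let lower := PySem.Str.lower raw
    if (["contamination", "contaminated", "impurity", "impurities"].any (fun w => PySem.Str.isIn w lower)) then "contamination"
    else if (["label", "labelling", "mislabel", "packaging text"].any (fun w => PySem.Str.isIn w lower)) then "mislabelling"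
    else if (["potency", "subpotent", "dissolution", "strength", "assay"].any (fun w => PySem.Str.isIn w lower)) then "subpotency"
    else if (["packaging", "container", "seal", "closure", "leak"].any (fun w => PySem.Str.isIn w lower)) then "packaging"
    else if (["sterile", "sterility", "non-sterile"].any (fun w => PySem.Str.isIn w lower)) then "sterility"
    else if (["foreign", "particulate", "particles", "matter"].any (fun w => PySem.Str.isIn w lower)) then "foreign_matter"
    else "other"

-- ===== PORT B =====
def pvCategories : List String :=
  ["contamination", "mislabelling", "subpotency", "packaging", "sterility", "foreign_matter"]

def pvKeywords : List (List Char × Nat) :=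
  [ ("contamination".toList, 0), ("contaminated".toList, 0), ("impurity".toList, 0), ("impurities".toList, 0),
    ("label".toList, 1), ("labelling".toList, 1), ("mislabel".toList, 1), ("packaging text".toList, 1),
    ("potency".toList, 2), ("subpotent".toList, 2), ("dissolution".toList, 2), ("strength".toList, 2), ("assay".toList, 2),
    ("packaging".toList, 3), ("container".toList, 3), ("seal".toList, 3), ("closure".toList, 3), ("leak".toList, 3),
    ("sterile".toList, 4), ("sterility".toList, 4), ("non-sterile".toList, 4),
    ("foreign".toList, 5), ("particulate".toList, 5), ("particles".toList, 5), ("matter".toList, 5) ]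

-- Source B's scan: for every position i, try every keyword as a prefix there
-- (lower.startswith(word, i) is exactly 'word <+:-test on lower[i:]', ported as
-- PySem.Chars.startswith (lower.drop i) word) and keep the minimum priority seen.
def map_reason_py_alt (raw : String) : String :=
  if raw = "" then "other"
  else
    let lower := (PySem.Str.lower raw).toList
    let best := (List.range lower.length).foldl (fun b i =>
      pvKeywords.foldl (fun b kw =>
        if PySem.Chars.startswith (lower.drop i) kw.1 then
          match b with
          | none => some kw.2
          | some q => if kw.2 < q then some kw.2 else b
        else b) b) none
    match best with
    | none => "other"
    | some p => pvCategories.getD p "other"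

-- ===== PRECONDITION & SPEC =====
def Spec_map_reason_py (raw : String) (out : String) : Prop := out = map_reason_py_alt raw
instance (raw : String) (out : String) : Decidable (Spec_map_reason_py raw out) := by unfold Spec_map_reason_py; infer_instance

-- ===== CLAIM (what is proved, stated in full; the proofs are below) =====
def Claim_equal_map_reason_py : Prop := ∀ (raw : String), Dom_map_reason_py raw → Spec_map_reason_py raw (map_reason_py raw)

-- ===== LEMMAS AND PROOFS =====

-- the min-update function the scan accumulates with
def pvMinU (b : Option Nat) (p : Nat) : Option Nat :=
  match b with
  | none => some p
  | some q => if p < q then some p else b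

theorem pvMinU_some (q p : Nat) : pvMinU (some q) p = some (min q p) := by
  rcases Nat.lt_or_ge p q with h | h
  · simp [pvMinU, h, Nat.le_of_lt h]
  · simp [pvMinU, Nat.min_def, Nat.not_lt.mpr h]

-- a guarded min-update fold is the fold over the filtered, projected list
theorem foldl_guard_minU (l : List Char) (i : Nat) (kws : List (List Char × Nat)) (b : Option Nat) :
    kws.foldl (fun b kw =>
        if PySem.Chars.startswith (l.drop i) kw.1 then
          match b with
          | none => some kw.2
          | some q => if kw.2 < q then some kw.2 else b
        else b) b
      = ((kws.filter (fun kw => PySem.Chars.startswith (l.drop i) kw.1)).map Prod.snd).foldl pvMinU b := by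
  induction kws generalizing b with
  | nil => rfl
  | cons kw kws ih =>
    simp only [List.foldl_cons, List.filter_cons]
    by_cases h : PySem.Chars.startswith (l.drop i) kw.1 = true
    · simp [h, ih, pvMinU]
    · simp [h, ih]

theorem foldl_pvMinU_some (L : List Nat) (q : Nat) : L.foldl pvMinU (some q) = some (L.foldl min q) := by
  induction L generalizing q with
  | nil => rfl
  | cons p L ih => simp [pvMinU_some, ih]

theorem foldl_pvMinU_none (L : List Nat) : L.foldl pvMinU none = L.min? := by
  cases L with
  | nil => rfl
  | cons p L =>
    rw [List.min?_cons']
    exact foldl_pvMinU_some L p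


-- the fold over positions, flattened
theorem foldl_positions (l : List Char) (ns : List Nat) (b : Option Nat) :
    ns.foldl (fun b i =>
        pvKeywords.foldl (fun b kw =>
          if PySem.Chars.startswith (l.drop i) kw.1 then
            match b with
            | none => some kw.2
            | some q => if kw.2 < q then some kw.2 else b
          else b) b) b
      = (ns.flatMap (fun i => (pvKeywords.filter (fun kw => PySem.Chars.startswith (l.drop i) kw.1)).map Prod.snd)).foldl pvMinU b := by
  induction ns generalizing b with
  | nil => rfl
  | cons i ns ih =>
    simp only [List.foldl_cons, List.flatMap_cons, List.foldl_append]
    rw [ih, foldl_guard_minU]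

-- membership in the flattened priority list ↔ some keyword of that priority occurs in the text
theorem mem_flat_iff (l : List Char) (p : Nat) :
    p ∈ ((List.range l.length).flatMap
        (fun i => (pvKeywords.filter (fun kw => PySem.Chars.startswith (l.drop i) kw.1)).map Prod.snd))
      ↔ ∃ kw ∈ pvKeywords, kw.2 = p ∧ PySem.Chars.isIn kw.1 l = true := by
  simp only [List.mem_flatMap, List.mem_map, List.mem_filter, List.mem_range]
  constructor
  · rintro ⟨i, hi, kw, ⟨hkw, hsw⟩, hp⟩
    refine ⟨kw, hkw, hp, ?_⟩
    rw [← PySem.Chars.exists_prefix_drop_iff_isIn]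
    exact ⟨i, (PySem.Chars.startswith_iff _ _).mp hsw⟩
  · rintro ⟨kw, hkw, hp, hin⟩
    rw [← PySem.Chars.exists_prefix_drop_iff_isIn] at hin
    obtain ⟨j, hj⟩ := hin
    have hne : kw.1 ≠ [] := by
      fin_cases hkw <;> simp
    have hjlt : j < l.length := by
      by_contra h
      have : l.drop j = [] := List.drop_eq_nil_of_le (by omega)
      rw [this, List.prefix_nil] at hj
      exact hne hj
    exact ⟨j, hjlt, kw, ⟨hkw, (PySem.Chars.startswith_iff _ _).mpr hj⟩, hp⟩

-- group-match booleans of A, over the char list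
def pvB (l : List Char) (p : Nat) : Bool :=
  (pvKeywords.filter (fun kw => kw.2 = p)).any (fun kw => PySem.Chars.isIn kw.1 l)

theorem mem_flat_iff_pvB (l : List Char) (p : Nat) :
    p ∈ ((List.range l.length).flatMap
        (fun i => (pvKeywords.filter (fun kw => PySem.Chars.startswith (l.drop i) kw.1)).map Prod.snd))
      ↔ pvB l p = true := by
  rw [mem_flat_iff, pvB, List.any_eq_true]
  constructor
  · rintro ⟨kw, hkw, hp, hin⟩
    exact ⟨kw, List.mem_filter.mpr ⟨hkw, by simp [hp]⟩, hin⟩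
  · rintro ⟨kw, hkw, hin⟩
    obtain ⟨h1, h2⟩ := List.mem_filter.mp hkw
    exact ⟨kw, h1, by simpa using h2, hin⟩

-- if pvB holds, the priority names one of the six groups
theorem pvB_lt_six (l : List Char) (p : Nat) (h : pvB l p = true) : p < 6 := by
  rw [pvB, List.any_eq_true] at h
  obtain ⟨kw, hkw, -⟩ := h
  have h1 := (List.mem_filter.mp hkw).1
  have h2 := (List.mem_filter.mp hkw).2
  fin_cases h1 <;> simp_all <;> omega

-- A's six branch booleans are pvB at priorities 0..5
theorem condA0 (s : String) :
    (["contamination", "contaminated", "impurity", "impurities"].any (fun w => PySem.Str.isIn w (PySem.Str.lower s)))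
      = pvB (PySem.Chars.lower s.toList) 0 := by
  simp [pvB, pvKeywords, PySem.Str.isIn_eq]

theorem condA1 (s : String) :
    (["label", "labelling", "mislabel", "packaging text"].any (fun w => PySem.Str.isIn w (PySem.Str.lower s)))
      = pvB (PySem.Chars.lower s.toList) 1 := by
  simp [pvB, pvKeywords, PySem.Str.isIn_eq]

theorem condA2 (s : String) :
    (["potency", "subpotent", "dissolution", "strength", "assay"].any (fun w => PySem.Str.isIn w (PySem.Str.lower s)))
      = pvB (PySem.Chars.lower s.toList) 2 := by
  simp [pvB, pvKeywords, PySem.Str.isIn_eq]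

theorem condA3 (s : String) :
    (["packaging", "container", "seal", "closure", "leak"].any (fun w => PySem.Str.isIn w (PySem.Str.lower s)))
      = pvB (PySem.Chars.lower s.toList) 3 := by
  simp [pvB, pvKeywords, PySem.Str.isIn_eq]

theorem condA4 (s : String) :
    (["sterile", "sterility", "non-sterile"].any (fun w => PySem.Str.isIn w (PySem.Str.lower s)))
      = pvB (PySem.Chars.lower s.toList) 4 := by
  simp [pvB, pvKeywords, PySem.Str.isIn_eq]

theorem condA5 (s : String) :
    (["foreign", "particulate", "particles", "matter"].any (fun w => PySem.Str.isIn w (PySem.Str.lower s)))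
      = pvB (PySem.Chars.lower s.toList) 5 := by
  simp [pvB, pvKeywords, PySem.Str.isIn_eq]

-- ===== VERDICT (by name: the statement is the Claim_ definition above) =====
theorem map_reason_py_spec : Claim_equal_map_reason_py := by
  intro raw _
  unfold Spec_map_reason_py map_reason_py map_reason_py_alt
  by_cases h0 : raw = ""
  · simp [h0]
  · simp only [h0, if_false]
    rw [condA0 raw, condA1 raw, condA2 raw, condA3 raw, condA4 raw, condA5 raw,
        foldl_positions, foldl_pvMinU_none]
    simp only [PySem.Str.toList_lower]
    cases hmin : ((List.range (PySem.Chars.lower raw.toList).length).flatMap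
        (fun i => (pvKeywords.filter (fun kw => PySem.Chars.startswith ((PySem.Chars.lower raw.toList).drop i) kw.1)).map Prod.snd)).min? with
    | none =>
      have hMnil := List.min?_eq_none_iff.mp hmin
      have hfalse : ∀ p, pvB (PySem.Chars.lower raw.toList) p = false := by
        intro p
        cases h : pvB (PySem.Chars.lower raw.toList) p
        · rfl
        · exfalso
          have := (mem_flat_iff_pvB (PySem.Chars.lower raw.toList) p).mpr h
          rw [hMnil] at this
          simp at this
      simp [hfalse]
    | some m =>
      have hspec := List.min?_eq_some_iff.mp hmin
      have hBm : pvB (PySem.Chars.lower raw.toList) m = true :=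
        (mem_flat_iff_pvB (PySem.Chars.lower raw.toList) m).mp hspec.1
      have hm6 : m < 6 := pvB_lt_six _ m hBm
      have hlow : ∀ p, p < m → pvB (PySem.Chars.lower raw.toList) p = false := by
        intro p hp
        cases h : pvB (PySem.Chars.lower raw.toList) p
        · rfl
        · exact absurd (hspec.2 p ((mem_flat_iff_pvB (PySem.Chars.lower raw.toList) p).mpr h)) (by omega)
      interval_cases m
      · simp [hBm, pvCategories]
      · simp [hBm, hlow 0 (by omega), pvCategories]
      · simp [hBm, hlow 0 (by omega), hlow 1 (by omega), pvCategories]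
      · simp [hBm, hlow 0 (by omega), hlow 1 (by omega), hlow 2 (by omega), pvCategories]
      · simp [hBm, hlow 0 (by omega), hlow 1 (by omega), hlow 2 (by omega), hlow 3 (by omega), pvCategories]
      · simp [hBm, hlow 0 (by omega), hlow 1 (by omega), hlow 2 (by omega), hlow 3 (by omega), hlow 4 (by omega), pvCategories]
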